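-- pv_equiv track=rewrite | github.com/pypi-data/pypi-mirror-401 | packages/zlsp/zlsp-1.0.0-py3-none-any.whl/core/parser/parser_modules/multiline_collectors.py | collect_pipe_multiline
-- ===== SOURCE A (Python) =====
-- from typing import Tuple, List
--
-- def collect_pipe_multiline(lines: list[str], start_idx: int, parent_indent: int) -> Tuple[str, int]:
--     """
--     Collect multi-line string content after pipe | marker.
--
--     Args:
--         lines: All lines
--         start_idx: Index to start collecting from
--         parent_indent: Indentation level of the parent key
--
--     Returns:
--         Tuple of (multiline_string, lines_consumed)
--     """
--     collected = []
--     base_indent = None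
--     lines_consumed = 0
--
--     for i in range(start_idx, len(lines)):
--         line = lines[i]
--         line_indent = len(line) - len(line.lstrip())
--
--         # If we hit a line at or less than parent indent, we're done
--         if line and line_indent <= parent_indent:
--             break
--
--         # Set base indent from first content line
--         if base_indent is None and line.strip():
--             base_indent = line_indent
--
--         # Collect line, stripping base indentation
--         if base_indent is not None:
--             if line_indent >= base_indent:
--                 # Strip base indent, keep relative indent
--                 relative_line = line[base_indent:] if len(line) >= base_indent else line.strip()
--                 collected.append(relative_line)
--             else:
--                 collected.append(line.strip())
--         else:
--             collected.append(line.strip())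
--
--         lines_consumed += 1
--
--     return '\n'.join(collected), lines_consumed
-- ===== SOURCE B (Python) =====
-- def _indent(line):
--     return len(line) - len(line.lstrip())
--
-- def _rule(base, line):
--     if _indent(line) >= base:
--         return line[base:] if len(line) >= base else line.strip()
--     return line.strip()
--
-- def collect_pipe_multiline(lines, start_idx, parent_indent):
--     # pass 1: extent — the consumed prefix of lines
--     prefix = []
--     for i in range(start_idx, len(lines)):
--         line = lines[i]
--         if line and _indent(line) <= parent_indent:
--             break
--         prefix.append(line)
--     # pass 2: base indent = indent of the first content line (if any)
--     k = next((j for j, l in enumerate(prefix) if l.strip()), len(prefix))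
--     tail = prefix[k:]
--     # pass 3: transform — blanks before the first content line, then the slice rule
--     if not tail:
--         body = [''] * len(prefix)
--     else:
--         base = _indent(tail[0])
--         body = [''] * k + [_rule(base, l) for l in tail]
--     return '\n'.join(body), len(prefix)
-- ===== Notes on version B (the rewrite author's own statement) =====
-- stated objective: alternative
-- what changed: A's single loop latching base_indent and collected lines is decomposed into three passes: an extent scan producing the consumed prefix, a search for the first content line fixing the base indent, and a comprehension applying the per-line rule; same linear cost.
import Mathlib
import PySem

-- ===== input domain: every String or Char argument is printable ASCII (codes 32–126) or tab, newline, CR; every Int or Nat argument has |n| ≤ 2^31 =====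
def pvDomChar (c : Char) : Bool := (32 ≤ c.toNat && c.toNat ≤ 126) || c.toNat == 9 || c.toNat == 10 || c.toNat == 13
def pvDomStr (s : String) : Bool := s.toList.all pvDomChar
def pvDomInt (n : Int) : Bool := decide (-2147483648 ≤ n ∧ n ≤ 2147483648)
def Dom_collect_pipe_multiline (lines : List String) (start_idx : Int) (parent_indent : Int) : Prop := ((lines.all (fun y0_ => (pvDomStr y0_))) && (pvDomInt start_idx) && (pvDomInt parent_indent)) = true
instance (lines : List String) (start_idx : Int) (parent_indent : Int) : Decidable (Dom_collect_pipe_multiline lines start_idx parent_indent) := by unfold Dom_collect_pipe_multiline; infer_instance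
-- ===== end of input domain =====

-- B replaces A's single loop with latched state (collected, base_indent, consumed) by three passes
-- (extent prefix, first content line's indent, per-line transform); same linear cost, different decomposition.

-- ===== PORT A =====
-- A's for-loop over range(start_idx, len(lines)) with break, carrying (collected, base_indent, lines_consumed)
def pvA_loop (lines : List String) (parent_indent : Int) :
    List Int → List String → Option Int → Int → List String × Int
  | [], collected, _base, consumed => (collected, consumed)
  | i :: rest, collected, base, consumed =>
    match PySem.List.pyGet? lines i with
    | none => (collected, consumed)   -- Python raises IndexError here; excluded by Pre_
    | some line =>
      let line_indent : Int := PySem.Str.len line - PySem.Str.len (PySem.Str.lstrip line)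
      if PySem.Str.len line ≠ 0 ∧ line_indent ≤ parent_indent then
        (collected, consumed)          -- break
      else
        let base' : Option Int :=
          if base = none ∧ PySem.Str.len (PySem.Str.strip line) ≠ 0 then some line_indent else base
        let entry : String :=
          match base' with
          | some b =>
            if line_indent ≥ b then
              (if PySem.Str.len line ≥ b then PySem.Str.slice line (some b) none
               else PySem.Str.strip line)
            else PySem.Str.strip line
          | none => PySem.Str.strip line
        pvA_loop lines parent_indent rest (collected ++ [entry]) base' (consumed + 1)

def collect_pipe_multiline (lines : List String) (start_idx : Int) (parent_indent : Int) : String × Int :=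
  let r := pvA_loop lines parent_indent (PySem.List.pyRange start_idx (PySem.List.len lines) 1) [] none 0
  (PySem.Str.join "\n" r.1, r.2)

-- ===== PORT B =====
def pvIndent (line : String) : Int := PySem.Str.len line - PySem.Str.len (PySem.Str.lstrip line)

def pvRule (base : Int) (line : String) : String :=
  if pvIndent line ≥ base then
    (if PySem.Str.len line ≥ base then PySem.Str.slice line (some base) none
     else PySem.Str.strip line)
  else PySem.Str.strip line

-- pass 1: extent — the consumed prefix of lines
def pvPrefix (lines : List String) (parent_indent : Int) : List Int → List String
  | [] => []
  | i :: rest =>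
    match PySem.List.pyGet? lines i with
    | none => []                       -- Python raises IndexError here; excluded by Pre_
    | some line =>
      if PySem.Str.len line ≠ 0 ∧ pvIndent line ≤ parent_indent then []
      else line :: pvPrefix lines parent_indent rest

def collect_pipe_multiline_alt (lines : List String) (start_idx : Int) (parent_indent : Int) : String × Int :=
  let pfx := pvPrefix lines parent_indent (PySem.List.pyRange start_idx (PySem.List.len lines) 1)
  -- pass 2: first content line
  let k := pfx.findIdx (fun l => PySem.Str.len (PySem.Str.strip l) != 0)
  -- pass 3: transform
  let body : List String :=
    match pfx.drop k with
    | [] => List.replicate pfx.length ""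
    | l :: rest => List.replicate k "" ++ (l :: rest).map (pvRule (pvIndent l))
  (PySem.Str.join "\n" body, (pfx.length : Int))

-- ===== PRECONDITION & SPEC =====
-- Pre_ excludes exactly the inputs on which the Python A raises IndexError: start_idx below -len(lines).
def Pre_collect_pipe_multiline (lines : List String) (start_idx : Int) (parent_indent : Int) : Prop :=
  -(lines.length : Int) ≤ start_idx
instance (lines : List String) (start_idx : Int) (parent_indent : Int) : Decidable (Pre_collect_pipe_multiline lines start_idx parent_indent) := by unfold Pre_collect_pipe_multiline; infer_instance

def pvWitness_collect_pipe_multiline : List String × Int × Int := (["a:", "  x", "  y", "b:"], 1, 0)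

def Spec_collect_pipe_multiline (lines : List String) (start_idx : Int) (parent_indent : Int) (out : String × Int) : Prop := out = collect_pipe_multiline_alt lines start_idx parent_indent
instance (lines : List String) (start_idx : Int) (parent_indent : Int) (out : String × Int) : Decidable (Spec_collect_pipe_multiline lines start_idx parent_indent out) := by unfold Spec_collect_pipe_multiline; infer_instance

-- ===== CLAIM (what is proved, stated in full; the proofs are below) =====
def Claim_equal_collect_pipe_multiline : Prop := ∀ (lines : List String) (start_idx : Int) (parent_indent : Int), Dom_collect_pipe_multiline lines start_idx parent_indent → Pre_collect_pipe_multiline lines start_idx parent_indent → Spec_collect_pipe_multiline lines start_idx parent_indent (collect_pipe_multiline lines start_idx parent_indent)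

-- ===== LEMMAS AND PROOFS =====

-- A's per-line transform, extracted: the latched base_indent threaded down the prefix.
def pvTrans (parent : Option Int) : List String → List String
  | [] => []
  | l :: r =>
    let base' : Option Int :=
      if parent = none ∧ PySem.Str.len (PySem.Str.strip l) ≠ 0 then some (pvIndent l) else parent
    let entry : String :=
      match base' with
      | some b => pvRule b l
      | none => PySem.Str.strip l
    entry :: pvTrans base' r

theorem pvA_loop_eq (lines : List String) (pi : Int) (idxs : List Int)
    (collected : List String) (base : Option Int) (consumed : Int) :
    pvA_loop lines pi idxs collected base consumed =
      (collected ++ pvTrans base (pvPrefix lines pi idxs),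
       consumed + ((pvPrefix lines pi idxs).length : Int)) := by
  induction idxs generalizing collected base consumed with
  | nil => simp [pvA_loop, pvPrefix, pvTrans]
  | cons i rest ih =>
    simp only [pvA_loop, pvPrefix, pvIndent]
    cases h : PySem.List.pyGet? lines i with
    | none => simp [pvTrans]
    | some line =>
      dsimp only
      by_cases hb : PySem.Str.len line ≠ 0 ∧
          PySem.Str.len line - PySem.Str.len (PySem.Str.lstrip line) ≤ pi
      · rw [if_pos hb, if_pos hb]
        simp [pvTrans]
      · rw [if_neg hb, if_neg hb, ih]
        simp only [pvTrans, pvRule, pvIndent]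
        by_cases hB : base = none ∧ PySem.Str.len (PySem.Str.strip line) ≠ 0
        · simp only [if_pos hB, Prod.mk.injEq]
          refine ⟨by simp, by simp only [List.length_cons]; omega⟩
        · simp only [if_neg hB, Prod.mk.injEq]
          cases base with
          | none => exact ⟨by simp, by simp only [List.length_cons]; omega⟩
          | some b => exact ⟨by simp, by simp only [List.length_cons]; omega⟩

theorem pvTrans_some (b : Int) (xs : List String) :
    pvTrans (some b) xs = xs.map (pvRule b) := by
  induction xs with
  | nil => simp [pvTrans]
  | cons l r ih => simp [pvTrans, ih]

theorem pvStripEmpty (s : String) (h : PySem.Str.len (PySem.Str.strip s) = 0) :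
    PySem.Str.strip s = "" := by
  have h2 : PySem.Chars.strip s.toList = [] := by simpa using h
  simp [PySem.Str.strip, h2]

theorem pvTrans_none (p : List String) :
    pvTrans none p =
      (match p.drop (p.findIdx fun l => PySem.Str.len (PySem.Str.strip l) != 0) with
       | [] => List.replicate p.length ""
       | l :: rest =>
         List.replicate (p.findIdx fun l => PySem.Str.len (PySem.Str.strip l) != 0) ""
           ++ (l :: rest).map (pvRule (pvIndent l))) := by
  induction p with
  | nil => simp [pvTrans]
  | cons l r ih =>
    by_cases hb : (PySem.Str.len (PySem.Str.strip l) != 0) = true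
    · have hne : PySem.Chars.strip l.toList ≠ [] := by simpa using hb
      have hb2 : ((((PySem.Chars.strip l.toList).length : Nat) : Int) != 0) = true := by
        simpa using hne
      simp [pvTrans, List.findIdx_cons, hne, hb2, pvTrans_some]
    · have hc : PySem.Str.len (PySem.Str.strip l) = 0 := by simpa using hb
      have hs := pvStripEmpty l hc
      have heq : PySem.Chars.strip l.toList = [] := by simpa using hc
      have hk : (List.findIdx (fun l => PySem.Str.len (PySem.Str.strip l) != 0) (l :: r))
          = (List.findIdx (fun l => PySem.Str.len (PySem.Str.strip l) != 0) r) + 1 := by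
        simp [List.findIdx_cons, heq]
      rw [hk]
      simp only [List.drop_succ_cons]
      cases hd : r.drop (List.findIdx (fun l => PySem.Str.len (PySem.Str.strip l) != 0) r) with
      | nil =>
        rw [hd] at ih
        simp only [] at ih
        simp [pvTrans, hs, ih, List.replicate_succ]
      | cons l2 rest =>
        rw [hd] at ih
        simp only [] at ih
        simp [pvTrans, hs, ih, List.replicate_succ]

-- ===== VERDICT (by name: the statement is the Claim_ definition above) =====
theorem collect_pipe_multiline_spec : Claim_equal_collect_pipe_multiline := by
  intro lines start_idx parent_indent _hdom _hpre
  unfold Spec_collect_pipe_multiline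
  simp only [collect_pipe_multiline, collect_pipe_multiline_alt]
  rw [pvA_loop_eq, pvTrans_none]
  cases hd : (pvPrefix lines parent_indent (PySem.List.pyRange start_idx (PySem.List.len lines) 1)).drop
      ((pvPrefix lines parent_indent (PySem.List.pyRange start_idx (PySem.List.len lines) 1)).findIdx
        (fun l => PySem.Str.len (PySem.Str.strip l) != 0)) with
  | nil => simp
  | cons l rest => simp
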